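-- pv_equiv track=rewrite | github.com/rf-iasys/OEIS | OEIS_A162648_1.py | generate_a162648_sieve_gen
-- ===== SOURCE A (Python) =====
-- def generate_a162648_sieve_gen(n_max):
--     """
--     Generate positions of patterns 1001 or 0110 in the Thue-Morse sequence
--     using the sieve method, in a memory-efficient way.
--     """
--     x = -1
--     marked_set = set()  # fast membership check
--
--     while True:
--         marked_number = 2 * (x + 1)
--         if marked_number > n_max - 3:  # clip to match official upper bound
--             break
--
--         # yield the marked number
--         yield marked_number
--         marked_set.add(marked_number)
--
--         # find next unmarked x
--         x += 1
--         while x in marked_set: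
--             x += 1
-- ===== SOURCE B (Python) =====
-- def generate_a162648_sieve_gen(n_max):
--     """Directly yield n with the Thue-Morse window t(n..n+3) equal to 1001 or 0110."""
--     def t(k):
--         return bin(k).count("1") & 1
--     n = 0
--     while n <= n_max - 3:
--         if (t(n), t(n + 1), t(n + 2), t(n + 3)) in ((1, 0, 0, 1), (0, 1, 1, 0)):
--             yield n
--         n += 1
-- ===== Notes on version B (the rewrite author's own statement) =====
-- stated objective: simpler
-- what changed: Replaced the stateful marking sieve (marked set plus skipping pointer) by a direct stateless scan that yields n whenever the four Thue-Morse bits t(n)..t(n+3) form one of the two defining complementary patterns, with t(k) the bit-count parity of k.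
import Mathlib
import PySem

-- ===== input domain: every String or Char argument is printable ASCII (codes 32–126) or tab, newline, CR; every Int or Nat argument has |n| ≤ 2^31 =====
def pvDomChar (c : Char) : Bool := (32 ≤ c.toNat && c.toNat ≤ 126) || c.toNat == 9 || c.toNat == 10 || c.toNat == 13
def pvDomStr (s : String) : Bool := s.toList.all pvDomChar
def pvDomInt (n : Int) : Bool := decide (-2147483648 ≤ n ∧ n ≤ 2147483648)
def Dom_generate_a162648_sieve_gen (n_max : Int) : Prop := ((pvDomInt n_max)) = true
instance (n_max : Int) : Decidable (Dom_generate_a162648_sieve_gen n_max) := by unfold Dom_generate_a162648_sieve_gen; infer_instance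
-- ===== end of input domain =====

-- B replaces A's marking sieve by a direct check of the defining four-bit Thue-Morse window (no mutable marked set / pointer state).

-- ===== PORT A =====
-- inner loop `while x in marked_set: x += 1`
def pvSkip (S : List Int) (x : Int) : Int :=
  if x ∈ S then pvSkip S (x + 1) else x
termination_by (S.filter (fun y => decide (x ≤ y))).length
decreasing_by
  rename_i h
  have hsub : List.Sublist (S.filter (fun y => decide (x + 1 ≤ y))) (S.filter (fun y => decide (x ≤ y))) := by
    apply List.monotone_filter_right
    intro a ha
    simp at ha ⊢; omega
  have hx : x ∈ S.filter (fun y => decide (x ≤ y)) := by simp [h]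
  have hx' : x ∉ S.filter (fun y => decide (x + 1 ≤ y)) := by simp
  rcases Nat.lt_or_ge (S.filter (fun y => decide (x + 1 ≤ y))).length
      (S.filter (fun y => decide (x ≤ y))).length with hlt | hge
  · exact hlt
  · have heq : (S.filter (fun y => decide (x + 1 ≤ y))) = (S.filter (fun y => decide (x ≤ y))) :=
      List.Sublist.eq_of_length_le hsub hge
    exact absurd (heq ▸ hx) hx'

theorem pvSkip_ge (S : List Int) (x : Int) : x ≤ pvSkip S x := by
  induction x using pvSkip.induct (S := S) with
  | case1 x h ih => rw [pvSkip, if_pos h]; omega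
  | case2 x h => rw [pvSkip, if_neg h]

-- outer loop `while True: …`
def pvSieve (n_max x : Int) (S : List Int) : List Int :=
  if 2 * (x + 1) > n_max - 3 then []
  else
    2 * (x + 1) ::
      pvSieve n_max (pvSkip (PySem.Set.add S (2 * (x + 1))) (x + 1)) (PySem.Set.add S (2 * (x + 1)))
termination_by (n_max - 2 * x).toNat
decreasing_by
  rename_i h
  have := pvSkip_ge (PySem.Set.add S (2 * (x + 1))) (x + 1)
  omega

def generate_a162648_sieve_gen (n_max : Int) : List Int := pvSieve n_max (-1) []

-- ===== PORT B =====
-- bin(k).count("1") for k ≥ 0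
def pvOnes (n : Nat) : Nat :=
  if n = 0 then 0 else n % 2 + pvOnes (n / 2)
decreasing_by omega

-- t(k) = bin(k).count("1") & 1
def pvT (k : Int) : Int := Int.ofNat (pvOnes k.toNat % 2)

-- `while n <= n_max - 3: if window in ((1,0,0,1),(0,1,1,0)): yield n; n += 1`
def pvBLoop (n_max n : Int) : List Int :=
  if n ≤ n_max - 3 then
    (if (pvT n, pvT (n + 1), pvT (n + 2), pvT (n + 3)) = ((1 : Int), (0 : Int), (0 : Int), (1 : Int)) ∨
        (pvT n, pvT (n + 1), pvT (n + 2), pvT (n + 3)) = ((0 : Int), (1 : Int), (1 : Int), (0 : Int))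
     then [n] else []) ++ pvBLoop n_max (n + 1)
  else []
termination_by (n_max - 2 - n).toNat
decreasing_by rename_i h; omega

def generate_a162648_sieve_gen_alt (n_max : Int) : List Int := pvBLoop n_max 0

-- ===== PRECONDITION & SPEC =====
def Spec_generate_a162648_sieve_gen (n_max : Int) (out : List Int) : Prop := out = generate_a162648_sieve_gen_alt n_max
instance (n_max : Int) (out : List Int) : Decidable (Spec_generate_a162648_sieve_gen n_max out) := by unfold Spec_generate_a162648_sieve_gen; infer_instance

-- ===== CLAIM (what is proved, stated in full; the proofs are below) =====
def Claim_equal_generate_a162648_sieve_gen : Prop := ∀ (n_max : Int), Dom_generate_a162648_sieve_gen n_max → Spec_generate_a162648_sieve_gen n_max (generate_a162648_sieve_gen n_max)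

-- ===== LEMMAS AND PROOFS =====

-- characterisation of the sieve's marked numbers
def F (m : Nat) : Bool :=
  if m % 2 = 1 then false
  else if m % 4 = 0 then true
  else !F (m / 2 - 1)
decreasing_by omega

theorem F_odd (a : Nat) (h : a % 2 = 1) : F a = false := by rw [F, if_pos h]

theorem F_zero : F 0 = true := by rw [F]; norm_num

theorem F_even_of_true (a : Nat) (h : F a = true) : a % 2 = 0 := by
  by_contra hc
  rw [F_odd a (by omega)] at h
  simp at h

theorem F_two_mul_odd (b : Nat) (hb : b % 2 = 1) : F (2 * b) = !F (b - 1) := by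
  rw [F, if_neg (by omega), if_neg (by omega), show 2 * b / 2 - 1 = b - 1 by omega]

theorem F_two_mul_even (b : Nat) (hb : b % 2 = 0) : F (2 * b) = true := by
  rw [F, if_neg (by omega), if_pos (by omega)]

theorem F_succ_double (a : Nat) (h : F a = false) : F (2 * (a + 1)) = true := by
  rcases Nat.even_or_odd a with ⟨j, hj⟩ | ⟨j, hj⟩
  · have hodd : (a + 1) % 2 = 1 := by omega
    rw [F_two_mul_odd (a + 1) hodd]
    have : a + 1 - 1 = a := by omega
    rw [this, h]
    rfl
  · exact F_two_mul_even (a + 1) (by omega)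

theorem pvOnes_lt (k : Nat) : pvOnes k % 2 < 2 := Nat.mod_lt _ (by norm_num)

theorem pvOnes_two_mul (k : Nat) : pvOnes (2 * k) % 2 = pvOnes k % 2 := by
  rw [pvOnes]
  rcases Nat.eq_zero_or_pos k with h | h
  · simp [h, pvOnes]
  · rw [if_neg (by omega)]
    have h1 : 2 * k % 2 = 0 := by omega
    have h2 : 2 * k / 2 = k := by omega
    rw [h1, h2, Nat.zero_add]

theorem pvOnes_two_mul_add_one (k : Nat) : pvOnes (2 * k + 1) % 2 = 1 - pvOnes k % 2 := by
  rw [pvOnes, if_neg (by omega)]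
  have h1 : (2 * k + 1) % 2 = 1 := by omega
  have h2 : (2 * k + 1) / 2 = k := by omega
  rw [h1, h2]
  have := pvOnes_lt k
  omega

-- the Nat-level form of B's window condition
def patN (n : Nat) : Bool :=
  decide ((pvOnes n % 2, pvOnes (n+1) % 2, pvOnes (n+2) % 2, pvOnes (n+3) % 2) = (1,0,0,1) ∨
          (pvOnes n % 2, pvOnes (n+1) % 2, pvOnes (n+2) % 2, pvOnes (n+3) % 2) = (0,1,1,0))

def gapB (k : Nat) : Bool := decide (pvOnes k % 2 ≠ pvOnes (k+1) % 2)

theorem gapB_two_mul (j : Nat) : gapB (2 * j) = true := by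
  unfold gapB
  have h1 := pvOnes_two_mul j
  have h3 := pvOnes_two_mul_add_one j
  have := pvOnes_lt j
  simp only [decide_eq_true_iff]
  omega

theorem gapB_two_mul_add_one (j : Nat) : gapB (2 * j + 1) = !gapB j := by
  unfold gapB
  have h1 := pvOnes_two_mul_add_one j
  have h2 : 2 * j + 1 + 1 = 2 * (j + 1) := by omega
  have h3 := pvOnes_two_mul (j + 1)
  have h4 := pvOnes_lt j
  have h5 := pvOnes_lt (j + 1)
  rw [h2, h1, h3]
  by_cases h : pvOnes j % 2 = pvOnes (j + 1) % 2 <;> simp [h] <;> omega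

theorem patN_eq (n : Nat) : patN n = if n % 2 = 0 then gapB (n / 2) else false := by
  unfold patN gapB
  rcases Nat.even_or_odd n with ⟨k, hk⟩ | ⟨k, hk⟩
  · subst hk
    have e0 : pvOnes (k + k) % 2 = pvOnes k % 2 := by
      rw [show k + k = 2 * k by omega]; exact pvOnes_two_mul k
    have e1 : pvOnes (k + k + 1) % 2 = 1 - pvOnes k % 2 := by
      rw [show k + k + 1 = 2 * k + 1 by omega]; exact pvOnes_two_mul_add_one k
    have e2 : pvOnes (k + k + 2) % 2 = pvOnes (k + 1) % 2 := by
      rw [show k + k + 2 = 2 * (k + 1) by omega]; exact pvOnes_two_mul (k + 1)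
    have e3 : pvOnes (k + k + 3) % 2 = 1 - pvOnes (k + 1) % 2 := by
      rw [show k + k + 3 = 2 * (k + 1) + 1 by omega]; exact pvOnes_two_mul_add_one (k + 1)
    have l0 := pvOnes_lt k
    have l1 := pvOnes_lt (k + 1)
    rw [if_pos (by omega), show (k + k) / 2 = k by omega, e0, e1, e2, e3]
    have hk0 : pvOnes k % 2 = 0 ∨ pvOnes k % 2 = 1 := by omega
    have hk1 : pvOnes (k + 1) % 2 = 0 ∨ pvOnes (k + 1) % 2 = 1 := by omega
    rcases hk0 with h0 | h0 <;> rcases hk1 with h1 | h1 <;> simp [h0, h1]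
  · subst hk
    have e1 : pvOnes (2 * k + 1 + 1) % 2 = pvOnes (k + 1) % 2 := by
      rw [show 2 * k + 1 + 1 = 2 * (k + 1) by omega]; exact pvOnes_two_mul (k + 1)
    have e2 : pvOnes (2 * k + 1 + 2) % 2 = 1 - pvOnes (k + 1) % 2 := by
      rw [show 2 * k + 1 + 2 = 2 * (k + 1) + 1 by omega]; exact pvOnes_two_mul_add_one (k + 1)
    have l1 := pvOnes_lt (k + 1)
    rw [if_neg (by omega)]
    have hc : pvOnes (k + 1) % 2 = 0 ∨ pvOnes (k + 1) % 2 = 1 := by omega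
    rcases hc with h | h <;> simp [e1, e2, h, Prod.ext_iff]

theorem F_two_mul (k : Nat) : F (2 * k) = gapB k := by
  induction k using Nat.strong_induction_on with
  | _ k ih =>
    rcases Nat.even_or_odd k with ⟨j, hj⟩ | ⟨j, hj⟩
    · subst hj
      rw [show j + j = 2 * j by omega, F_two_mul_even (2 * j) (by omega), gapB_two_mul]
    · subst hj
      rw [F_two_mul_odd (2 * j + 1) (by omega), show 2 * j + 1 - 1 = 2 * j by omega,
        ih j (by omega), gapB_two_mul_add_one]

theorem patN_eq_F (n : Nat) : patN n = F n := by
  rw [patN_eq]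
  rcases Nat.even_or_odd n with ⟨k, hk⟩ | ⟨k, hk⟩
  · subst hk
    rw [if_pos (by omega), show k + k = 2 * k by omega, show 2 * k / 2 = k by omega, F_two_mul]
  · subst hk
    rw [if_neg (by omega), F_odd _ (by omega)]

-- B's inline window condition, as a function of F
theorem window_iff (n : Int) (h : 0 ≤ n) :
    ((pvT n, pvT (n + 1), pvT (n + 2), pvT (n + 3)) = ((1 : Int), (0 : Int), (0 : Int), (1 : Int)) ∨
     (pvT n, pvT (n + 1), pvT (n + 2), pvT (n + 3)) = ((0 : Int), (1 : Int), (1 : Int), (0 : Int)))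
    ↔ F n.toNat = true := by
  rw [← patN_eq_F]
  have h1 : (n + 1).toNat = n.toNat + 1 := by omega
  have h2 : (n + 2).toNat = n.toNat + 2 := by omega
  have h3 : (n + 3).toNat = n.toNat + 3 := by omega
  unfold pvT patN
  rw [h1, h2, h3]
  simp only [Prod.mk.injEq, decide_eq_true_eq, Int.ofNat_eq_natCast]
  constructor <;> rintro (⟨h1, h2, h3, h4⟩ | ⟨h1, h2, h3, h4⟩) <;> [left; right; left; right] <;>
    refine ⟨?_, ?_, ?_, ?_⟩ <;> omega

theorem pvBLoop_stop (n_max n : Int) (h : n_max - 3 < n) : pvBLoop n_max n = [] := by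
  rw [pvBLoop, if_neg (by omega)]

theorem pvBLoop_hit (n_max n : Int) (h0 : 0 ≤ n) (h1 : n ≤ n_max - 3) (hF : F n.toNat = true) :
    pvBLoop n_max n = n :: pvBLoop n_max (n + 1) := by
  rw [pvBLoop, if_pos h1, if_pos ((window_iff n h0).mpr hF)]
  rfl

theorem pvBLoop_miss (n_max n : Int) (h0 : 0 ≤ n) (hF : F n.toNat = false) :
    pvBLoop n_max n = pvBLoop n_max (n + 1) ∨ n_max - 3 < n := by
  by_cases h1 : n ≤ n_max - 3
  · left
    rw [pvBLoop, if_pos h1, if_neg (by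
      intro hw
      rw [(window_iff n h0).mp hw] at hF
      simp at hF)]
    rfl
  · right; omega

theorem pvBLoop_skip (n_max : Int) : ∀ (k : Nat) (a b : Int), b - a = (k : Int) → 0 ≤ a →
    (∀ nn : Int, a ≤ nn → nn < b → F nn.toNat = false) → pvBLoop n_max a = pvBLoop n_max b := by
  intro k
  induction k with
  | zero =>
    intro a b hk ha hm
    have hab : a = b := by omega
    rw [hab]
  | succ k ih =>
    intro a b hk ha hmiss
    have hab : a < b := by omega
    rcases pvBLoop_miss n_max a ha (hmiss a le_rfl hab) with h | h
    · rw [h]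
      exact ih (a + 1) b (by omega) (by omega) (fun nn h1 h2 => hmiss nn (by omega) h2)
    · rw [pvBLoop_stop n_max a (by omega), pvBLoop_stop n_max b (by omega)]

-- pvSkip specification
theorem pvSkip_not_mem (S : List Int) (x : Int) : pvSkip S x ∉ S := by
  induction x using pvSkip.induct (S := S) with
  | case1 x h ih => rw [pvSkip, if_pos h]; exact ih
  | case2 x h => rw [pvSkip, if_neg h]; exact h

theorem pvSkip_mem_of_lt (S : List Int) (x : Int) :
    ∀ y : Int, x ≤ y → y < pvSkip S x → y ∈ S := by
  induction x using pvSkip.induct (S := S) with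
  | case1 x h ih =>
    intro y h1 h2
    rw [pvSkip, if_pos h] at h2
    rcases eq_or_lt_of_le h1 with rfl | h1
    · exact h
    · exact ih y (by omega) h2
  | case2 x h =>
    intro y h1 h2
    rw [pvSkip, if_neg h] at h2
    omega

-- main invariant lemma: from a loop head state the sieve emits exactly B's list from 2*(x+1)
theorem sieve_main : ∀ (n_max x : Int) (S : List Int), -1 ≤ x → (x = -1 ∨ F x.toNat = false) →
    (∀ m : Int, m ∈ S ↔ 0 ≤ m ∧ m ≤ 2 * x ∧ F m.toNat = true) →
    pvSieve n_max x S = pvBLoop n_max (2 * (x + 1)) := by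
  intro n_max x S
  induction x, S using pvSieve.induct (n_max := n_max) with
  | case1 x S hstop =>
    intro _ _ _
    rw [pvSieve, if_pos hstop, pvBLoop_stop n_max _ (by omega)]
  | case2 x S hgo ih =>
    intro hx hFx hS
    set m : Int := 2 * (x + 1) with hm
    set S' : List Int := PySem.Set.add S m with hS'def
    set x' : Int := pvSkip S' (x + 1) with hx'def
    have hm0 : 0 ≤ m := by omega
    -- the yielded number is always F-marked
    have hFm : F m.toNat = true := by
      rcases hFx with rfl | hFx
      · have : m.toNat = 0 := by omega
        rw [this]; exact F_zero
      · have hx0 : 0 ≤ x := by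
          rcases eq_or_lt_of_le hx with h | h
          · exfalso; rw [← h] at hFx; simp at hFx; rw [F_zero] at hFx; simp at hFx
          · omega
        have : m.toNat = 2 * (x.toNat + 1) := by omega
        rw [this]
        exact F_succ_double x.toNat hFx
    -- membership in S'
    have hS' : ∀ m' : Int, m' ∈ S' ↔ 0 ≤ m' ∧ m' ≤ 2 * x + 2 ∧ F m'.toNat = true := by
      intro m'
      rw [hS'def, PySem.Set.mem_add, hS m']
      constructor
      · rintro (⟨h1, h2, h3⟩ | rfl)
        · exact ⟨h1, by omega, h3⟩
        · exact ⟨hm0, by omega, hFm⟩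
      · rintro ⟨h1, h2, h3⟩
        by_cases h4 : m' ≤ 2 * x
        · exact Or.inl ⟨h1, h4, h3⟩
        · have heven := F_even_of_true m'.toNat h3
          have : m' = 2 * x + 1 ∨ m' = 2 * x + 2 := by omega
          rcases this with rfl | rfl
          · exfalso; omega
          · exact Or.inr (by omega)
    have hge : x + 1 ≤ x' := pvSkip_ge S' (x + 1)
    -- the pointer never jumps past 2x+3
    have hub : x' ≤ 2 * x + 3 := by
      by_contra hc
      have hmem : (2 * x + 3) ∈ S' := pvSkip_mem_of_lt S' (x + 1) (2 * x + 3) (by omega) (by omega)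
      have := (hS' (2 * x + 3)).mp hmem
      have heven := F_even_of_true (2 * x + 3).toNat this.2.2
      omega
    -- new pointer is unmarked
    have hFx' : F x'.toNat = false := by
      by_contra hc
      have hc' : F x'.toNat = true := by
        cases hfx : F x'.toNat
        · exact absurd hfx hc
        · rfl
      have hnm := pvSkip_not_mem S' (x + 1)
      rw [← hx'def] at hnm
      have heven := F_even_of_true x'.toNat hc'
      have hx'le : x' ≤ 2 * x + 2 := by omega
      exact hnm ((hS' x').mpr ⟨by omega, hx'le, hc'⟩)
    -- everything strictly between m and 2*(x'+1) is unmarked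
    have hgap : ∀ nn : Int, m + 1 ≤ nn → nn < 2 * (x' + 1) → F nn.toNat = false := by
      intro nn h1 h2
      by_cases hpar : nn.toNat % 2 = 1
      · exact F_odd _ hpar
      · -- nn even, nn = 2*y with x+1 < y ≤ x'
        have hnn0 : 0 ≤ nn := by omega
        have hy : ∃ y : Int, nn = 2 * y := ⟨nn / 2, by omega⟩
        rcases hy with ⟨y, rfl⟩
        have hy1 : x + 2 ≤ y := by omega
        have hy2 : y ≤ x' := by omega
        have hmemy : (y - 1) ∈ S' := pvSkip_mem_of_lt S' (x + 1) (y - 1) (by omega) (by omega)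
        have hy1' := (hS' (y - 1)).mp hmemy
        have heven := F_even_of_true (y - 1).toNat hy1'.2.2
        have hyodd : y.toNat % 2 = 1 := by omega
        have : (2 * y).toNat = 2 * y.toNat := by omega
        rw [this, F_two_mul_odd y.toNat hyodd, show y.toNat - 1 = (y - 1).toNat by omega,
          hy1'.2.2]
        rfl
    -- invariant for the recursive call, with the bound pushed to 2*x'
    have hS'x' : ∀ m' : Int, m' ∈ S' ↔ 0 ≤ m' ∧ m' ≤ 2 * x' ∧ F m'.toNat = true := by
      intro m'
      rw [hS' m']
      constructor
      · rintro ⟨h1, h2, h3⟩; exact ⟨h1, by omega, h3⟩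
      · rintro ⟨h1, h2, h3⟩
        refine ⟨h1, ?_, h3⟩
        by_contra hc
        have := hgap m' (by omega) (by omega)
        rw [this] at h3
        simp at h3
    have hrec := ih (by omega) (Or.inr hFx') hS'x'
    rw [pvSieve, if_neg hgo, ← hm, ← hS'def, ← hx'def, hrec]
    rw [pvBLoop_hit n_max m hm0 (by omega) hFm]
    congr 1
    exact (pvBLoop_skip n_max (2 * (x' + 1) - (m + 1)).toNat (m + 1) (2 * (x' + 1))
      (by omega) (by omega) hgap).symm

-- ===== VERDICT (by name: the statement is the Claim_ definition above) =====
theorem generate_a162648_sieve_gen_spec : Claim_equal_generate_a162648_sieve_gen := by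
  intro n_max _
  unfold Spec_generate_a162648_sieve_gen generate_a162648_sieve_gen generate_a162648_sieve_gen_alt
  have h := sieve_main n_max (-1) [] (by omega) (Or.inl rfl)
    (by intro m; simp; omega)
  rw [h]
  norm_num
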